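-- pv_equiv track=rewrite | github.com/xianer235/115-media-hub | app/services/subscription_episode.py | _build_subscription_episode_bucket_key
-- ===== SOURCE A (Python) =====
-- from typing import Any, Dict, List, Optional, Set, Tuple
--
-- def _build_subscription_episode_bucket_key(episode_values: Set[int]) -> str:
--     normalized = sorted({max(0, int(value or 0)) for value in (episode_values or set()) if max(0, int(value or 0)) > 0})
--     if not normalized:
--         return ""
--     if len(normalized) == 1:
--         return f"e:{normalized[0]}"
--     start = normalized[0]
--     end = normalized[-1]
--     expected = list(range(start, end + 1))
--     if normalized == expected:
--         return f"r:{start}-{end}"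
--     return f"m:{','.join([str(value) for value in normalized[:24]])}"
-- ===== SOURCE B (Python) =====
-- def _build_subscription_episode_bucket_key(episode_values):
--     # One fused scan over the sorted (duplicate-carrying) normalized values:
--     # dedupe on the fly, track lo/prev/count, check contiguity by adjacent gaps,
--     # and collect the first 24 distinct values as strings as we go.
--     vals = sorted(max(0, int(v or 0)) for v in (episode_values or set()))
--     prev = 0          # last kept value; 0 = nothing kept yet (kept values are > 0)
--     lo = 0
--     count = 0
--     contiguous = True
--     head = []
--     for v in vals:
--         if v <= 0 or v == prev:
--             continue
--         if prev == 0: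
--             lo = v
--         elif v != prev + 1:
--             contiguous = False
--         if count < 24:
--             head.append(str(v))
--         count += 1
--         prev = v
--     if count == 0:
--         return ""
--     if count == 1:
--         return f"e:{lo}"
--     if contiguous:
--         return f"r:{lo}-{prev}"
--     return "m:" + ",".join(head)
-- ===== Notes on version B (the rewrite author's own statement) =====
-- stated objective: alternative
-- what changed: B replaces A's set-comprehension + sort-of-set + range-list comparison with one fused scan over the sorted duplicate-carrying list that dedupes on the fly while accumulating lo, last value, distinct count, adjacent-gap contiguity and the first 24 items as strings, choosing the branch only from those accumulators.
import Mathlib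
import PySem

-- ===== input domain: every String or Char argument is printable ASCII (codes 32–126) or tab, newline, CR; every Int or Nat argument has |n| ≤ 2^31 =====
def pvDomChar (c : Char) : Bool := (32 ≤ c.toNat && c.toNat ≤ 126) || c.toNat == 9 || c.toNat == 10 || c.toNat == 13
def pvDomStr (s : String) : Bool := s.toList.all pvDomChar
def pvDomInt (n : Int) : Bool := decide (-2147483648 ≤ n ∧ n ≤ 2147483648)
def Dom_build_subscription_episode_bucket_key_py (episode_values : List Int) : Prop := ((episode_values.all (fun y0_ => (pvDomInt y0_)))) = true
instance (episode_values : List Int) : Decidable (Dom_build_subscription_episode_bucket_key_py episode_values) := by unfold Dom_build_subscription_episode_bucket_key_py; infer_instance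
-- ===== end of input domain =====

-- B replaces A's set-build + sort-of-set + range-list comparison with one fused scan over the
-- sorted duplicate-carrying list, deduping on the fly while accumulating lo/last/count/adjacent-gap
-- contiguity and the first 24 items as strings; objective: alternative decomposition.

-- ===== PORT A =====
-- normalized = sorted({max(0, int(value or 0)) for value in (episode_values or set()) if max(0, int(value or 0)) > 0})
-- (int(value or 0) = value for an int argument; exact)
def build_subscription_episode_bucket_key_py (episode_values : List Int) : String :=
  let s : PySem.Set Int := episode_values.foldl
    (fun acc value => if 0 < max 0 value then PySem.Set.add acc (max 0 value) else acc)
    PySem.Set.empty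
  let normalized := PySem.List.sorted s (fun x => x) false
  if normalized = [] then ""
  else if normalized.length = 1 then "e:" ++ PySem.Int.toStr (PySem.List.pyGetD normalized 0 0)
  else
    let start := PySem.List.pyGetD normalized 0 0
    let stop := PySem.List.pyGetD normalized (-1) 0
    let expected := PySem.List.pyRange start (stop + 1) 1
    if normalized = expected then
      "r:" ++ PySem.Int.toStr start ++ "-" ++ PySem.Int.toStr stop
    else
      "m:" ++ PySem.Str.join "," ((PySem.List.slice normalized none (some 24)).map PySem.Int.toStr)

-- ===== PORT B =====
-- loop body of B's single scan; state = (prev, lo, count, contiguous, head)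
def pvStepB (st : Int × Int × Int × Bool × List String) (v : Int) : Int × Int × Int × Bool × List String :=
  match st with
  | (prev, lo, count, contiguous, head) =>
    if v ≤ 0 ∨ v = prev then (prev, lo, count, contiguous, head)
    else
      (v, if prev = 0 then v else lo, count + 1,
       if prev = 0 then contiguous else if v ≠ prev + 1 then false else contiguous,
       if count < 24 then head ++ [PySem.Int.toStr v] else head)

def build_subscription_episode_bucket_key_py_alt (episode_values : List Int) : String :=
  let vals := PySem.List.sorted (episode_values.map (fun v => max 0 v)) (fun x => x) false
  match vals.foldl pvStepB ((0 : Int), (0 : Int), (0 : Int), true, ([] : List String)) with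
  | (prev, lo, count, contiguous, head) =>
    if count = 0 then ""
    else if count = 1 then "e:" ++ PySem.Int.toStr lo
    else if contiguous then "r:" ++ PySem.Int.toStr lo ++ "-" ++ PySem.Int.toStr prev
    else "m:" ++ PySem.Str.join "," head

-- ===== PRECONDITION & SPEC =====
def Spec_build_subscription_episode_bucket_key_py (episode_values : List Int) (out : String) : Prop := out = build_subscription_episode_bucket_key_py_alt episode_values
instance (episode_values : List Int) (out : String) : Decidable (Spec_build_subscription_episode_bucket_key_py episode_values out) := by unfold Spec_build_subscription_episode_bucket_key_py; infer_instance

-- ===== CLAIM (what is proved, stated in full; the proofs are below) =====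
def Claim_equal_build_subscription_episode_bucket_key_py : Prop := ∀ (episode_values : List Int), Dom_build_subscription_episode_bucket_key_py episode_values → Spec_build_subscription_episode_bucket_key_py episode_values (build_subscription_episode_bucket_key_py episode_values)

-- ===== LEMMAS AND PROOFS =====

-- A's set-building fold is Set.add over the positive elements
lemma pv_fold_aux (l : List Int) (acc : PySem.Set Int) :
    l.foldl (fun acc value => if 0 < max 0 value then PySem.Set.add acc (max 0 value) else acc) acc
    = (l.filter (fun v => 0 < v)).foldl PySem.Set.add acc := by
  induction l generalizing acc with
  | nil => rfl
  | cons x xs ih =>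
    by_cases h : 0 < x
    · rw [List.foldl_cons, if_pos (by omega : (0:Int) < max 0 x), max_eq_right h.le, ih]
      simp [h]
    · rw [List.foldl_cons, if_neg (by omega : ¬ (0:Int) < max 0 x), ih]
      simp [h]

-- the subsequence B's scan keeps (values > 0, ≠ last kept)
def pvKeep : Int → List Int → List Int
  | _, [] => []
  | p, v :: ys => if v ≤ 0 ∨ v = p then pvKeep p ys else v :: pvKeep v ys

-- B's scan only looks at the kept subsequence
lemma pv_foldl_keep (ys : List Int) (prev lo c : Int) (contig : Bool) (head : List String) :
    ys.foldl pvStepB (prev, lo, c, contig, head)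
    = (pvKeep prev ys).foldl pvStepB (prev, lo, c, contig, head) := by
  induction ys generalizing prev lo c contig head with
  | nil => rfl
  | cons v ys ih =>
    by_cases h : v ≤ 0 ∨ v = prev
    · rw [List.foldl_cons, pvKeep, if_pos h]
      show ys.foldl pvStepB (pvStepB (prev, lo, c, contig, head) v) = _
      rw [pvStepB, if_pos h]
      exact ih prev lo c contig head
    · rw [List.foldl_cons, pvKeep, if_neg h, List.foldl_cons]
      show ys.foldl pvStepB (pvStepB (prev, lo, c, contig, head) v) = _
      rw [pvStepB, if_neg h]
      exact ih v _ _ _ _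

lemma pv_keep_mem (ys : List Int) (p x : Int) (hpw : ys.Pairwise (· ≤ ·))
    (hle : ∀ y ∈ ys, p ≤ y) :
    x ∈ pvKeep p ys ↔ x ∈ ys ∧ 0 < x ∧ x ≠ p := by
  induction ys generalizing p with
  | nil => simp [pvKeep]
  | cons v ys ih =>
    have hpw' := (List.pairwise_cons.mp hpw).2
    have hv := (List.pairwise_cons.mp hpw).1
    by_cases h : v ≤ 0 ∨ v = p
    · rw [pvKeep, if_pos h, ih p hpw' (fun y hy => hle y (List.mem_cons_of_mem _ hy))]
      constructor
      · rintro ⟨h1, h2, h3⟩; exact ⟨List.mem_cons_of_mem _ h1, h2, h3⟩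
      · rintro ⟨h1, h2, h3⟩
        rcases List.mem_cons.mp h1 with rfl | h1'
        · rcases h with h' | h' <;> omega
        · exact ⟨h1', h2, h3⟩
    · push_neg at h
      obtain ⟨hv0, hvp⟩ := h
      rw [pvKeep, if_neg (by push_neg; exact ⟨hv0, hvp⟩)]
      rw [List.mem_cons, ih v hpw' hv]
      have hpv : p < v := lt_of_le_of_ne (hle v (by simp)) (Ne.symm hvp)
      constructor
      · rintro (rfl | ⟨h1, h2, h3⟩)
        · exact ⟨by simp, by omega, hvp⟩
        · exact ⟨List.mem_cons_of_mem _ h1, h2, by have := hv x h1; omega⟩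
      · rintro ⟨h1, h2, h3⟩
        rcases List.mem_cons.mp h1 with rfl | h1'
        · exact Or.inl rfl
        · by_cases hxv : x = v
          · exact Or.inl hxv
          · exact Or.inr ⟨h1', h2, hxv⟩

lemma pv_keep_pairwise (ys : List Int) (p : Int) (hpw : ys.Pairwise (· ≤ ·))
    (hle : ∀ y ∈ ys, p ≤ y) :
    (pvKeep p ys).Pairwise (· < ·) := by
  induction ys generalizing p with
  | nil => simp [pvKeep]
  | cons v ys ih =>
    have hpw' := (List.pairwise_cons.mp hpw).2
    have hv := (List.pairwise_cons.mp hpw).1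
    by_cases h : v ≤ 0 ∨ v = p
    · rw [pvKeep, if_pos h]
      exact ih p hpw' (fun y hy => hle y (List.mem_cons_of_mem _ hy))
    · rw [pvKeep, if_neg h]
      refine List.pairwise_cons.mpr ⟨?_, ih v hpw' hv⟩
      intro x hx
      rw [pv_keep_mem ys v x hpw' hv] at hx
      have := hv x hx.1
      have := hx.2.2
      omega

-- a strictly increasing chain of length k starting at a ends at least at a + k
lemma pv_last_ge (t : List Int) (a : Int) (hp : List.Pairwise (· < ·) (a :: t)) :
    a + t.length ≤ (a :: t).getLast (by simp) := by
  induction t generalizing a with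
  | nil => simp
  | cons b t' ih =>
    have hab : a < b := (List.pairwise_cons.mp hp).1 b (by simp)
    have hp' : List.Pairwise (· < ·) (b :: t') := (List.pairwise_cons.mp hp).2
    have := ih b hp'
    rw [List.getLast_cons (by simp)]
    simp only [List.length_cons] at this ⊢
    push_cast at this ⊢
    omega

-- B's contiguity flag over the kept tail
def pvChain : Int → List Int → Bool
  | _, [] => true
  | p, v :: ys => decide (v = p + 1) && pvChain v ys

lemma pv_chain_true_iff (t : List Int) (a : Int) (hp : List.Pairwise (· < ·) (a :: t)) :
    pvChain a t = true ↔ a + t.length = (a :: t).getLast (by simp) := by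
  induction t generalizing a with
  | nil => simp [pvChain]
  | cons b t' ih =>
    have hab : a < b := (List.pairwise_cons.mp hp).1 b (by simp)
    have hp' : List.Pairwise (· < ·) (b :: t') := (List.pairwise_cons.mp hp).2
    have hge := pv_last_ge t' b hp'
    rw [List.getLast_cons (by simp)]
    rw [pvChain, Bool.and_eq_true, decide_eq_true_iff, ih b hp']
    simp only [List.length_cons]
    constructor
    · rintro ⟨rfl, h2⟩; push_cast; omega
    · intro h
      have hb : b = a + 1 := by push_cast at h hge; omega
      refine ⟨hb, ?_⟩
      push_cast at h ⊢; omega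

-- a strictly increasing integer chain with the matching length IS the range
lemma pv_chain_eq_range (t : List Int) (a : Int) (hp : List.Pairwise (· < ·) (a :: t))
    (hlen : a + t.length = (a :: t).getLast (by simp)) :
    a :: t = PySem.List.pyRange a ((a :: t).getLast (by simp) + 1) 1 := by
  induction t generalizing a with
  | nil =>
    simp only [List.getLast_singleton] at hlen ⊢
    exact (PySem.List.pyRange_one_singleton a).symm
  | cons b t' ih =>
    have hab : a < b := (List.pairwise_cons.mp hp).1 b (by simp)
    have hp' : List.Pairwise (· < ·) (b :: t') := (List.pairwise_cons.mp hp).2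
    have hge := pv_last_ge t' b hp'
    rw [List.getLast_cons (by simp)] at hlen ⊢
    simp only [List.length_cons] at hlen
    have hb : b = a + 1 := by push_cast at hlen hge; omega
    have hlen' : b + ((t' : List Int).length : Int) = (b :: t').getLast (by simp) := by
      push_cast at hlen ⊢; omega
    have ihr := ih b hp' hlen'
    have hlast : a < (b :: t').getLast (by simp) + 1 := by
      push_cast at hlen hge; omega
    rw [PySem.List.pyRange_one_cons hlast, ← hb, ← ihr]

-- closed form of B's fold over a strictly increasing positive list
lemma pv_fold_spec (ys : List Int) (p lo c : Int) (contig : Bool) (head : List String)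
    (hp : 0 < p) (hpw : List.Pairwise (· < ·) (p :: ys)) :
    ys.foldl pvStepB (p, lo, c, contig, head)
    = ((p :: ys).getLast (by simp), lo, c + (ys.length : Int),
       contig && pvChain p ys,
       head ++ (ys.take (24 - c).toNat).map PySem.Int.toStr) := by
  induction ys generalizing p c contig head with
  | nil => simp [pvChain]
  | cons v ys ih =>
    have hpv : p < v := (List.pairwise_cons.mp hpw).1 v (by simp)
    have hpw' : List.Pairwise (· < ·) (v :: ys) := (List.pairwise_cons.mp hpw).2
    have hp0 : ¬ p = 0 := by omega
    rw [List.foldl_cons]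
    show List.foldl pvStepB (pvStepB (p, lo, c, contig, head) v) ys = _
    rw [pvStepB, if_neg (by push_neg; constructor <;> omega), if_neg hp0, if_neg hp0]
    rw [ih v (c + 1) (if v ≠ p + 1 then false else contig)
        (if c < 24 then head ++ [PySem.Int.toStr v] else head) (by omega) hpw']
    have e1 : (v :: ys).getLast (by simp) = (p :: v :: ys).getLast (by simp) :=
      (List.getLast_cons (by simp)).symm
    have e3 : c + 1 + (ys.length : Int) = c + ((v :: ys).length : Int) := by
      simp only [List.length_cons]; push_cast; ring
    have e4 : ((if v ≠ p + 1 then false else contig) && pvChain v ys)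
        = (contig && pvChain p (v :: ys)) := by
      rw [pvChain]
      by_cases hv1 : v = p + 1 <;> simp [hv1]
    have e5 : (if c < 24 then head ++ [PySem.Int.toStr v] else head)
          ++ ((ys.take (24 - (c + 1)).toNat).map PySem.Int.toStr)
        = head ++ (((v :: ys).take (24 - c).toNat).map PySem.Int.toStr) := by
      by_cases hc : c < 24
      · rw [if_pos hc]
        have h1 : (24 - c).toNat = (24 - (c + 1)).toNat + 1 := by omega
        rw [h1, List.take_succ_cons, List.map_cons, List.append_assoc, List.singleton_append]
      · rw [if_neg hc]
        have h1 : (24 - c).toNat = 0 := by omega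
        have h2 : (24 - (c + 1)).toNat = 0 := by omega
        rw [h1, h2]
        simp
    rw [e1, e3, e4, e5]

lemma pv_main (ev : List Int) :
    build_subscription_episode_bucket_key_py ev = build_subscription_episode_bucket_key_py_alt ev := by
  unfold build_subscription_episode_bucket_key_py build_subscription_episode_bucket_key_py_alt
  set s : PySem.Set Int := ev.foldl
    (fun acc value => if 0 < max 0 value then PySem.Set.add acc (max 0 value) else acc)
    PySem.Set.empty with hs
  dsimp only
  set L := PySem.List.sorted s (fun x => x) false with hL
  set S := PySem.List.sorted (ev.map fun v => max 0 v) (fun x => x) false with hS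
  -- facts about S
  have hSpw : S.Pairwise (· ≤ ·) := by
    have := PySem.List.sorted_pairwise (ev.map fun v => max 0 v) (fun x => x) (κ := Int)
    simpa [hS] using this
  have hSle : ∀ y ∈ S, (0:Int) ≤ y := by
    intro y hy
    rw [hS, PySem.List.mem_sorted, List.mem_map] at hy
    obtain ⟨v, _, rfl⟩ := hy
    exact le_max_left 0 v
  -- facts about L
  have hLpw : L.Pairwise (· < ·) := by
    rw [hL, hs, pv_fold_aux]
    have := PySem.List.sorted_ofList_pairwise_lt (ev.filter (fun v => 0 < v))
    simpa [PySem.Set.ofList_eq_foldl] using this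
  have hLmem : ∀ x, x ∈ L ↔ x ∈ ev ∧ 0 < x := by
    intro x
    rw [hL, PySem.List.mem_sorted, hs, pv_fold_aux,
        show (PySem.Set.empty : PySem.Set Int) = [] from rfl,
        ← PySem.Set.ofList_eq_foldl, PySem.Set.mem_ofList, List.mem_filter]
    simp
  -- the kept subsequence of S is exactly L
  have hKL : pvKeep 0 S = L := by
    have hKmem : ∀ x, x ∈ pvKeep 0 S ↔ x ∈ ev ∧ 0 < x := by
      intro x
      rw [pv_keep_mem S 0 x hSpw hSle]
      constructor
      · rintro ⟨h1, h2, _⟩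
        rw [hS, PySem.List.mem_sorted, List.mem_map] at h1
        obtain ⟨v, hv, hvx⟩ := h1
        have : v = x := by omega
        exact ⟨this ▸ hv, h2⟩
      · rintro ⟨h1, h2⟩
        refine ⟨?_, h2, by omega⟩
        rw [hS, PySem.List.mem_sorted, List.mem_map]
        exact ⟨x, h1, by omega⟩
    have hKpw := pv_keep_pairwise S 0 hSpw hSle
    have hperm : (pvKeep 0 S).Perm L := by
      rw [List.perm_ext_iff_of_nodup (hKpw.imp ne_of_lt) (hLpw.imp ne_of_lt)]
      intro a; rw [hKmem, hLmem]
    exact List.Perm.eq_of_pairwise (fun a b _ _ hab hba => le_antisymm hab hba)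
      (hKpw.imp le_of_lt) (hLpw.imp le_of_lt) hperm
  have hLpos : ∀ x ∈ L, 0 < x := fun x hx => ((hLmem x).mp hx).2
  rw [pv_foldl_keep, hKL]
  match hLc : L with
  | [] => simp
  | [a] =>
    have ha : 0 < a := hLpos a (by simp)
    have hstep : pvStepB ((0:Int),(0:Int),(0:Int),true,([]:List String)) a
        = (a, a, 1, true, [PySem.Int.toStr a]) := by
      rw [pvStepB, if_neg (by push_neg; omega)]
      norm_num
    rw [List.foldl_cons, hstep]
    simp [PySem.List.pyGetD_zero_cons]
  | a :: b :: t =>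
    have hne : (a :: b :: t) ≠ [] := by simp
    have hpw : (a :: b :: t).Pairwise (· < ·) := hLpw
    have ha : 0 < a := hLpos a (by simp)
    rw [if_neg hne, if_neg (show ¬((a :: b :: t).length = 1) by simp)]
    rw [PySem.List.pyGetD_zero_cons, PySem.List.pyGetD_neg_one (a :: b :: t) 0 hne]
    have hstep : pvStepB ((0:Int),(0:Int),(0:Int),true,([]:List String)) a
        = (a, a, 1, true, [PySem.Int.toStr a]) := by
      rw [pvStepB, if_neg (by push_neg; omega)]
      norm_num
    rw [List.foldl_cons, hstep,
        pv_fold_spec (b :: t) a a 1 true [PySem.Int.toStr a] ha hpw]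
    have hgl : (a :: b :: t).getLast hne = (b :: t).getLast (by simp) :=
      List.getLast_cons (by simp)
    have hge := pv_last_ge (b :: t) a hpw
    by_cases hch : pvChain a (b :: t) = true
    · have hlen := (pv_chain_true_iff (b :: t) a hpw).mp hch
      rw [if_pos (hgl ▸ pv_chain_eq_range (b :: t) a hpw hlen)]
      rw [hch]
      show _ = (if (1 + (((b :: t).length : Int)) = 0) then "" else _)
      rw [if_neg (show ¬(1 + (((b :: t).length : Int)) = 0) by simp only [List.length_cons]; push_cast; omega)]
      rw [if_neg (show ¬(1 + (((b :: t).length : Int)) = 1) by simp only [List.length_cons]; push_cast; omega)]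
      rw [if_pos (show (true && true) = true by simp)]
    · have hlen : a + ((b :: t).length : Int) ≠ (a :: b :: t).getLast hne := by
        rw [hgl]; exact fun h => hch ((pv_chain_true_iff (b :: t) a hpw).mpr h)
      rw [if_neg ?hno]
      case hno =>
        intro heq
        have hl := congrArg List.length heq
        rw [PySem.List.length_pyRange_one] at hl
        rw [hgl] at hlen
        simp only [List.length_cons] at hl hge hlen
        omega
      rw [Bool.true_and, (Bool.not_eq_true _).mp hch]
      show _ = (if (1 + (((b :: t).length : Int)) = 0) then "" else _)
      rw [if_neg (show ¬(1 + (((b :: t).length : Int)) = 0) by simp only [List.length_cons]; push_cast; omega)]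
      rw [if_neg (show ¬(1 + (((b :: t).length : Int)) = 1) by simp only [List.length_cons]; push_cast; omega)]
      rw [PySem.List.slice_to (a :: b :: t) (by norm_num : (0:Int) ≤ 24)]
      have h24 : ((24:Int)).toNat = 23 + 1 := by decide
      rw [h24, List.take_succ_cons, List.map_cons]
      simp

-- ===== VERDICT (by name: the statement is the Claim_ definition above) =====
theorem build_subscription_episode_bucket_key_py_spec : Claim_equal_build_subscription_episode_bucket_key_py := by
  intro episode_values _
  unfold Spec_build_subscription_episode_bucket_key_py
  exact pv_main episode_values
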